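-- pv_equiv track=rewrite | github.com/ts721521/ZhiWei2026 | 2026/office_converter.py | _normalize_extracted_text
-- ===== SOURCE A (Python) =====
-- def _normalize_extracted_text(text):
--     text = (text or "").replace("\r\n", "\n").replace("\r", "\n")
--     lines = [ln.rstrip() for ln in text.split("\n")]
--     cleaned = []
--     last_blank = False
--     for ln in lines:
--         if ln.strip():
--             cleaned.append(ln)
--             last_blank = False
--         else:
--             if not last_blank:
--                 cleaned.append("")
--             last_blank = True
--     return "\n".join(cleaned).strip()
-- ===== SOURCE B (Python) =====
-- def _normalize_extracted_text(text):
--     # Two whole-string character passes instead of A's split-into-lines +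
--     # stateful last_blank loop: pass 1 drops spaces/tabs that precede a
--     # newline or the end (per-line rstrip), pass 2 collapses runs of
--     # newlines to at most two; final strip as in A.
--     s = (text or "").replace("\r\n", "\n").replace("\r", "\n")
--     out = []
--     run = []
--     for ch in s:
--         if ch == " " or ch == "\t":
--             run.append(ch)
--         elif ch == "\n":
--             out.append("\n")
--             run = []
--         else:
--             out.extend(run)
--             run = []
--             out.append(ch)
--     res = []
--     nl = 0
--     for ch in out:
--         if ch == "\n":
--             nl += 1
--         else:
--             res.append("\n" * min(nl, 2))
--             nl = 0
--             res.append(ch)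
--     return "".join(res).strip()
-- ===== Notes on version B (the rewrite author's own statement) =====
-- stated objective: alternative
-- what changed: Replaces A's split-into-lines + stateful last_blank loop + join with two whole-string character passes: one streaming pass that drops spaces/tabs preceding a newline or the end (per-line rstrip without building a line list), and one that collapses every run of newlines to at most two; no line list or blank-line flag is ever built.
import Mathlib
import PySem

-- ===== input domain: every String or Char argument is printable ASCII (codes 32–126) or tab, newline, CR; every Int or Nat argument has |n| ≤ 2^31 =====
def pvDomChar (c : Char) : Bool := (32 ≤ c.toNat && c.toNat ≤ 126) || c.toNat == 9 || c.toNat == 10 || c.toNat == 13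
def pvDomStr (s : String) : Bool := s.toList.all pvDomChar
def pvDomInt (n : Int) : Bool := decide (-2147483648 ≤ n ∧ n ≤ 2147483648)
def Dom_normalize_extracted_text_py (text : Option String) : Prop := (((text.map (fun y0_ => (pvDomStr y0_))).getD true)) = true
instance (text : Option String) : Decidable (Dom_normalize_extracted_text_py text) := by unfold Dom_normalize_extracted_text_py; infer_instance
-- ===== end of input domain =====

-- B replaces A's split-into-lines + stateful last_blank loop + join with two whole-string
-- character passes (per-line rstrip as a stream, then newline-run collapsing); alternative
-- decomposition, same asymptotic cost.

-- ===== PORT A =====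
def normalize_extracted_text_py (text : Option String) : String :=
  let t : List Char :=
    PySem.Chars.replace (PySem.Chars.replace (text.getD "").toList ['\r', '\n'] ['\n']) ['\r'] ['\n']
  let lines : List (List Char) := (PySem.Chars.splitOn t ['\n']).map PySem.Chars.rstrip
  let st : List (List Char) × Bool := lines.foldl
    (fun st ln =>
      if PySem.Chars.strip ln ≠ [] then (st.1 ++ [ln], false)
      else if st.2 = false then (st.1 ++ [([] : List Char)], true) else (st.1, true))
    ([], false)
  String.ofList (PySem.Chars.strip (PySem.Chars.join ['\n'] st.1))

-- ===== PORT B =====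
def normalize_extracted_text_py_alt (text : Option String) : String :=
  let s : List Char :=
    PySem.Chars.replace (PySem.Chars.replace (text.getD "").toList ['\r', '\n'] ['\n']) ['\r'] ['\n']
  let st1 : List Char × List Char := s.foldl
    (fun st ch =>
      if ch = ' ' ∨ ch = '\t' then (st.1, st.2 ++ [ch])
      else if ch = '\n' then (st.1 ++ ['\n'], [])
      else (st.1 ++ st.2 ++ [ch], []))
    ([], [])
  let st2 : List Char × Nat := st1.1.foldl
    (fun st ch =>
      if ch = '\n' then (st.1, st.2 + 1)
      else (st.1 ++ List.replicate (min st.2 2) '\n' ++ [ch], 0))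
    ([], 0)
  String.ofList (PySem.Chars.strip st2.1)

-- ===== PRECONDITION & SPEC =====
def Spec_normalize_extracted_text_py (text : Option String) (out : String) : Prop := out = normalize_extracted_text_py_alt text
instance (text : Option String) (out : String) : Decidable (Spec_normalize_extracted_text_py text out) := by unfold Spec_normalize_extracted_text_py; infer_instance

-- ===== CLAIM (what is proved, stated in full; the proofs are below) =====
def Claim_equal_normalize_extracted_text_py : Prop := ∀ (text : Option String), Dom_normalize_extracted_text_py text → Spec_normalize_extracted_text_py text (normalize_extracted_text_py text)

-- ===== LEMMAS AND PROOFS =====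

-- A's cleaning loop as structural recursion (lines kept, runs of blanks collapsed).
def cleanRec : List (List Char) → Bool → List (List Char)
  | [], _ => []
  | ln :: ls, lb =>
    if PySem.Chars.strip ln ≠ [] then ln :: cleanRec ls false
    else if lb = false then [] :: cleanRec ls true
    else cleanRec ls true

-- maximal runs of non-blank lines (the common normal form both ports are reduced to)
def paraRec : List (List Char) → List (List Char) → List (List (List Char))
  | [], cur => if cur ≠ [] then [cur] else []
  | ln :: ls, cur =>
    if ln ≠ [] then paraRec ls (cur ++ [ln])
    else if cur ≠ [] then cur :: paraRec ls [] else paraRec ls []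

-- paragraphs interleaved with single blank lines
def glueP : List (List (List Char)) → List (List Char)
  | [] => []
  | [p] => p
  | p :: q :: ps => p ++ [[]] ++ glueP (q :: ps)

def tbA (ls : List (List Char)) : List (List Char) :=
  if ls.getLast? = some [] then [([] : List Char)] else []

def tb0A (ls : List (List Char)) : List (List Char) :=
  if ls.any (fun l => decide (l ≠ [])) then tbA ls else []

theorem foldA_eq : ∀ (ls : List (List Char)) (acc : List (List Char)) (lb : Bool),
    (ls.foldl (fun st ln =>
      if PySem.Chars.strip ln ≠ [] then (st.1 ++ [ln], false)
      else if st.2 = false then (st.1 ++ [([] : List Char)], true) else (st.1, true))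
      (acc, lb)).1 = acc ++ cleanRec ls lb := by
  intro ls
  induction ls with
  | nil => intro acc lb; simp [cleanRec]
  | cons ln ls ih =>
    intro acc lb
    rw [List.foldl_cons]
    by_cases h : PySem.Chars.strip ln = []
    · cases lb with
      | false =>
        have hstep : (if PySem.Chars.strip ln ≠ [] then ((acc, false).1 ++ [ln], false)
            else if (acc, false).2 = false then ((acc, false).1 ++ [([] : List Char)], true) else ((acc, false).1, true)) = ((acc ++ [([] : List Char)], true) : List (List Char) × Bool) := by simp [h]
        rw [hstep, ih]
        simp [cleanRec, h]
      | true =>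
        have hstep : (if PySem.Chars.strip ln ≠ [] then ((acc, true).1 ++ [ln], false)
            else if (acc, true).2 = false then ((acc, true).1 ++ [([] : List Char)], true) else ((acc, true).1, true)) = ((acc, true) : List (List Char) × Bool) := by simp [h]
        rw [hstep, ih]
        simp [cleanRec, h]
    · have hstep : (if PySem.Chars.strip ln ≠ [] then ((acc, lb).1 ++ [ln], false)
            else if (acc, lb).2 = false then ((acc, lb).1 ++ [([] : List Char)], true) else ((acc, lb).1, true)) = ((acc ++ [ln], false) : List (List Char) × Bool) := by simp [h]
      rw [hstep, ih]
      simp [cleanRec, h]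

theorem isspace_nl : PySem.Chars.isspace '\n' = true := by decide

theorem lstrip_cons_nl (s : List Char) :
    PySem.Chars.lstrip ('\n' :: s) = PySem.Chars.lstrip s := by
  simp [PySem.Chars.lstrip, isspace_nl]

theorem strip_cons_nl (s : List Char) :
    PySem.Chars.strip ('\n' :: s) = PySem.Chars.strip s := by
  simp [PySem.Chars.strip, lstrip_cons_nl]

theorem rstrip_append_nl (s : List Char) :
    PySem.Chars.rstrip (s ++ ['\n']) = PySem.Chars.rstrip s := by
  simp [PySem.Chars.rstrip, List.reverse_append, isspace_nl]

theorem lstrip_append (s t : List Char) :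
    PySem.Chars.lstrip (s ++ t) =
      if PySem.Chars.lstrip s = [] then PySem.Chars.lstrip t else PySem.Chars.lstrip s ++ t := by
  induction s with
  | nil => simp [PySem.Chars.lstrip]
  | cons c s ih =>
    by_cases h : PySem.Chars.isspace c = true
    · simpa [PySem.Chars.lstrip, h] using ih
    · simp [PySem.Chars.lstrip, h]

theorem strip_append_nl (s : List Char) :
    PySem.Chars.strip (s ++ ['\n']) = PySem.Chars.strip s := by
  simp only [PySem.Chars.strip]
  rw [lstrip_append]
  split_ifs with h
  · rw [h]; decide
  · rw [rstrip_append_nl]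

theorem dropWhile_head_false {p : Char → Bool} :
    ∀ (l : List Char) (c : Char) (t : List Char), List.dropWhile p l = c :: t → p c = false := by
  intro l
  induction l with
  | nil => intro c t h; simp at h
  | cons a l ih =>
    intro c t h
    by_cases ha : p a = true
    · simp [ha] at h
      exact ih _ _ h
    · simp [ha] at h
      rw [← h.1]; simpa using ha

theorem rstrip_eq_nil_iff (s : List Char) :
    PySem.Chars.rstrip s = [] ↔ ∀ c ∈ s, PySem.Chars.isspace c = true := by
  simp [PySem.Chars.rstrip, List.dropWhile_eq_nil_iff]

theorem strip_nil_all (y : List Char) (h : PySem.Chars.strip y = []) :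
    ∀ c ∈ y, PySem.Chars.isspace c = true := by
  intro c hc
  have hall : ∀ c ∈ PySem.Chars.lstrip y, PySem.Chars.isspace c = true := by
    have := h
    simp only [PySem.Chars.strip] at this
    exact (rstrip_eq_nil_iff _).mp this
  have hsplit := List.takeWhile_append_dropWhile (p := PySem.Chars.isspace) (l := y)
  rw [← hsplit] at hc
  rcases List.mem_append.mp hc with h1 | h2
  · exact List.mem_takeWhile_imp h1
  · exact hall c h2

theorem strip_rstrip_nil_iff (x : List Char) :
    PySem.Chars.strip (PySem.Chars.rstrip x) = [] ↔ PySem.Chars.rstrip x = [] := by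
  constructor
  · intro h
    rcases hd : List.dropWhile PySem.Chars.isspace x.reverse with _ | ⟨c, t⟩
    · simp [PySem.Chars.rstrip, hd]
    · have hc : PySem.Chars.isspace c = false := dropWhile_head_false _ _ _ hd
      have hx : PySem.Chars.rstrip x = (c :: t).reverse := by simp [PySem.Chars.rstrip, hd]
      have hmem : c ∈ PySem.Chars.rstrip x := by rw [hx]; simp
      have := strip_nil_all _ h c hmem
      rw [this] at hc; exact absurd hc (by simp)
  · intro h; rw [h]; rfl

theorem cleanRec_all_blank : ∀ (ls : List (List Char)), (∀ l ∈ ls, l = []) → cleanRec ls true = [] := by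
  intro ls
  induction ls with
  | nil => intro _; rfl
  | cons l ls ih =>
    intro h
    have hl : l = [] := h l (by simp)
    subst hl
    simp only [cleanRec]
    simpa using ih (fun l hl => h l (by simp [hl]))

theorem paraRec_ne_nil_of_cur : ∀ (ls : List (List Char)) (cur : List (List Char)),
    cur ≠ [] → paraRec ls cur ≠ [] := by
  intro ls
  induction ls with
  | nil => intro cur h; simp [paraRec, h]
  | cons ln ls ih =>
    intro cur h
    by_cases hln : ln = []
    · simp [paraRec, hln, h]
    · simpa [paraRec, hln] using ih (cur ++ [ln]) (by simp)

theorem paraRec_nil_iff : ∀ (ls : List (List Char)),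
    paraRec ls [] = [] ↔ ∀ l ∈ ls, l = [] := by
  intro ls
  induction ls with
  | nil => simp [paraRec]
  | cons l ls ih =>
    by_cases hl : l = []
    · subst hl; simpa [paraRec] using ih
    · simp only [paraRec, if_pos hl, List.nil_append]
      constructor
      · intro h; exact absurd h (paraRec_ne_nil_of_cur ls [l] (by simp))
      · intro h; exact absurd (h l (by simp)) hl

theorem paraRec_mem_ne : ∀ (ls : List (List Char)) (cur : List (List Char)) (p : List (List Char)),
    p ∈ paraRec ls cur → p ≠ [] := by
  intro ls
  induction ls with
  | nil =>
    intro cur p hp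
    by_cases h : cur = [] <;> simp [paraRec, h] at hp
    rw [hp]; exact ‹cur ≠ []›
  | cons ln ls ih =>
    intro cur p hp
    by_cases hln : ln = []
    · by_cases hc : cur = []
      · exact ih [] p (by simpa [paraRec, hln, hc] using hp)
      · simp only [paraRec, if_neg (by simp [hln] : ¬ ln ≠ []), if_pos hc] at hp
        rcases List.mem_cons.mp hp with h1 | h2
        · rw [h1]; exact hc
        · exact ih [] p h2
    · exact ih (cur ++ [ln]) p (by simpa [paraRec, hln] using hp)

theorem glue_cons (p : List (List Char)) (P : List (List (List Char))) (h : P ≠ []) :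
    glueP (p :: P) = p ++ [[]] ++ glueP P := by
  cases P with
  | nil => exact absurd rfl h
  | cons q ps => rfl

theorem glue_ne (P : List (List (List Char))) (hP : P ≠ []) (hne : ∀ p ∈ P, p ≠ []) :
    glueP P ≠ [] := by
  cases P with
  | nil => exact absurd rfl hP
  | cons p ps =>
    cases ps with
    | nil => simpa [glueP] using hne p (by simp)
    | cons q ps' => simp [glueP]

theorem getLast?_all_blank : ∀ (ls : List (List Char)), ls ≠ [] → (∀ l ∈ ls, l = []) →
    ls.getLast? = some [] := by
  intro ls
  induction ls with
  | nil => intro h; exact absurd rfl h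
  | cons l ls ih =>
    intro _ hall
    cases ls with
    | nil => simpa using hall l (by simp)
    | cons m ms =>
      rw [List.getLast?_cons_cons]
      exact ih (by simp) (fun x hx => hall x (by simp [hx]))

theorem join_append (sep : List Char) : ∀ (xs ys : List (List Char)), xs ≠ [] → ys ≠ [] →
    PySem.Chars.join sep (xs ++ ys) =
      PySem.Chars.join sep xs ++ sep ++ PySem.Chars.join sep ys := by
  intro xs
  induction xs with
  | nil => intro ys h; exact absurd rfl h
  | cons x xs ih =>
    intro ys _ hys
    cases xs with
    | nil =>
      cases ys with
      | nil => exact absurd rfl hys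
      | cons y ys' => simp [PySem.Chars.join_cons_cons, PySem.Chars.join_singleton]
    | cons x' xs' =>
      rw [show (x :: x' :: xs') ++ ys = x :: ((x' :: xs') ++ ys) by simp]
      rw [show (x' :: xs') ++ ys = x' :: (xs' ++ ys) by simp]
      rw [PySem.Chars.join_cons_cons, PySem.Chars.join_cons_cons]
      rw [show x' :: (xs' ++ ys) = (x' :: xs') ++ ys by simp]
      rw [ih ys (by simp) hys]
      simp [List.append_assoc]

theorem join_glue : ∀ (P : List (List (List Char))), (∀ p ∈ P, p ≠ []) →
    PySem.Chars.join ['\n'] (glueP P) =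
      PySem.Chars.join ['\n', '\n'] (P.map (PySem.Chars.join ['\n'])) := by
  intro P
  induction P with
  | nil => intro _; rfl
  | cons p ps ih =>
    intro hne
    cases ps with
    | nil => simp [glueP, PySem.Chars.join_singleton]
    | cons q ps' =>
      have hg : glueP (q :: ps') ≠ [] :=
        glue_ne _ (by simp) (fun r hr => hne r (by simp [hr]))
      rcases hgl : glueP (q :: ps') with _ | ⟨c, t⟩
      · exact absurd hgl hg
      · rw [glue_cons p (q :: ps') (by simp)]
        rw [List.append_assoc]
        rw [join_append ['\n'] p ([[]] ++ glueP (q :: ps')) (hne p (by simp)) (by simp)]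
        rw [hgl]
        rw [show ([([] : List Char)] ++ (c :: t)) = ([] : List Char) :: c :: t by simp]
        rw [PySem.Chars.join_cons_cons]
        rw [← hgl, ih (fun r hr => hne r (by simp [hr]))]
        rw [show (p :: q :: ps').map (PySem.Chars.join ['\n']) =
          PySem.Chars.join ['\n'] p :: (q :: ps').map (PySem.Chars.join ['\n']) by simp]
        rcases hm : (q :: ps').map (PySem.Chars.join ['\n']) with _ | ⟨m, ms⟩
        · simp at hm
        · rw [PySem.Chars.join_cons_cons]
          simp [List.append_assoc]

theorem strip_join_blank_cons (X : List (List Char)) :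
    PySem.Chars.strip (PySem.Chars.join ['\n'] ([] :: X)) =
      PySem.Chars.strip (PySem.Chars.join ['\n'] X) := by
  cases X with
  | nil => rfl
  | cons b X' =>
    rw [PySem.Chars.join_cons_cons]
    rw [show (([] : List Char) ++ ['\n'] ++ PySem.Chars.join ['\n'] (b :: X')) =
      '\n' :: PySem.Chars.join ['\n'] (b :: X') by simp]
    exact strip_cons_nl _

theorem strip_join_append_blank (X : List (List Char)) :
    PySem.Chars.strip (PySem.Chars.join ['\n'] (X ++ [[]])) =
      PySem.Chars.strip (PySem.Chars.join ['\n'] X) := by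
  cases hX : X with
  | nil => rfl
  | cons x X' =>
    rw [← hX]
    rw [join_append ['\n'] X [[]] (by rw [hX]; simp) (by simp)]
    rw [show PySem.Chars.join ['\n'] [[]] = [] from rfl]
    rw [List.append_nil]
    exact strip_append_nl _

theorem tbA_cons (l : List Char) (ls : List (List Char)) (h : ls ≠ []) :
    tbA (l :: ls) = tbA ls := by
  rcases ls with _ | ⟨m, ms⟩
  · exact absurd rfl h
  · unfold tbA; rw [List.getLast?_cons_cons]

theorem tbA_cons_nonblank (l : List Char) (ls : List (List Char)) (hl : l ≠ []) :
    tbA (l :: ls) = tbA ls := by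
  rcases ls with _ | ⟨m, ms⟩
  · unfold tbA; simp [hl]
  · exact tbA_cons l _ (by simp)

theorem tb0A_cons_blank (ls : List (List Char)) : tb0A (([] : List Char) :: ls) = tb0A ls := by
  unfold tb0A
  have hany : ((([] : List Char)) :: ls).any (fun l => decide (l ≠ [])) = ls.any (fun l => decide (l ≠ [])) := by
    simp
  rw [hany]
  by_cases ha : ls.any (fun l => decide (l ≠ [])) = true
  · rw [if_pos ha, if_pos ha]
    refine tbA_cons _ _ ?_
    intro hnil; rw [hnil] at ha; simp at ha
  · rw [if_neg ha, if_neg ha]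

theorem tb0A_cons_nonblank (l : List Char) (ls : List (List Char)) (hl : l ≠ []) :
    tb0A (l :: ls) = tbA ls := by
  unfold tb0A
  have hany : (l :: ls).any (fun x => decide (x ≠ [])) = true := by simp [hl]
  rw [if_pos hany]
  exact tbA_cons_nonblank l ls hl

theorem any_of_not_all_blank (ls : List (List Char)) (h : ¬ ∀ x ∈ ls, x = []) :
    ls.any (fun l => decide (l ≠ [])) = true := by
  rcases not_forall.mp h with ⟨x, hx⟩
  have hx' := Classical.not_imp.mp hx
  exact List.any_eq_true.mpr ⟨x, hx'.1, by simpa using hx'.2⟩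

theorem strip_nil_eq : PySem.Chars.strip ([] : List Char) = [] := rfl

theorem ggMain : ∀ (n : ℕ) (ls : List (List Char)), ls.length ≤ n →
    (∀ l ∈ ls, (PySem.Chars.strip l = [] ↔ l = [])) →
    (cleanRec ls true = glueP (paraRec ls []) ++ tb0A ls ∧
     ∀ cur, cur ≠ [] → cur ++ cleanRec ls false = glueP (paraRec ls cur) ++ tbA ls) := by
  intro n
  induction n with
  | zero =>
    intro ls hlen _
    have hls : ls = [] := List.length_eq_zero_iff.mp (Nat.le_zero.mp hlen)
    subst hls
    refine ⟨rfl, ?_⟩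
    intro cur hc
    simp [cleanRec, paraRec, glueP, tbA, hc]
  | succ n ih =>
    intro ls hlen H
    cases ls with
    | nil =>
      refine ⟨rfl, ?_⟩
      intro cur hc
      simp [cleanRec, paraRec, glueP, tbA, hc]
    | cons l ls' =>
      have hlen' : ls'.length ≤ n := by simpa using hlen
      have H' : ∀ x ∈ ls', (PySem.Chars.strip x = [] ↔ x = []) :=
        fun x hx => H x (by simp [hx])
      have IH := ih ls' hlen' H'
      by_cases hb : PySem.Chars.strip l = []
      · have hl : l = [] := (H l (by simp)).mp hb
        subst hl
        constructor
        · have hcl : cleanRec ([] :: ls') true = cleanRec ls' true := by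
            simp [cleanRec, strip_nil_eq]
          have hpa : paraRec (([] : List Char) :: ls') [] = paraRec ls' [] := by
            simp [paraRec]
          rw [hcl, hpa, tb0A_cons_blank, IH.1]
        · intro cur hc
          have hcl : cleanRec ([] :: ls') false = [] :: cleanRec ls' true := by
            simp [cleanRec, strip_nil_eq]
          have hpa : paraRec (([] : List Char) :: ls') cur = cur :: paraRec ls' [] := by
            simp [paraRec, hc]
          rw [hcl, hpa]
          by_cases hP : paraRec ls' [] = []
          · have hall : ∀ x ∈ ls', x = [] := (paraRec_nil_iff ls').mp hP
            have hct : cleanRec ls' true = [] := cleanRec_all_blank ls' hall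
            have hall' : ∀ x ∈ ([] : List Char) :: ls', x = [] := by
              intro x hx
              rcases List.mem_cons.mp hx with h1 | h2
              · exact h1
              · exact hall x h2
            have htb : tbA (([] : List Char) :: ls') = [[]] := by
              unfold tbA
              rw [if_pos (getLast?_all_blank _ (by simp) hall')]
            rw [hP, hct, htb]
            simp [glueP]
          · rw [glue_cons cur _ hP, IH.1]
            have hnall : ¬ ∀ x ∈ ls', x = [] := fun h => hP ((paraRec_nil_iff ls').mpr h)
            have hne : ls' ≠ [] := by
              intro h; subst h; exact hnall (by simp)
            have htb : tb0A ls' = tbA (([] : List Char) :: ls') := by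
              unfold tb0A
              rw [if_pos (any_of_not_all_blank ls' hnall), tbA_cons _ _ hne]
            rw [htb]
            simp [List.append_assoc]
      · have hlne : l ≠ [] := by
          intro h; subst h; exact hb rfl
        constructor
        · have hcl : cleanRec (l :: ls') true = l :: cleanRec ls' false := by
            simp [cleanRec, hb]
          have hpa : paraRec (l :: ls') [] = paraRec ls' [l] := by
            simp [paraRec, hlne]
          rw [hcl, hpa, tb0A_cons_nonblank l ls' hlne, ← IH.2 [l] (by simp)]
          simp
        · intro cur hc
          have hcl : cleanRec (l :: ls') false = l :: cleanRec ls' false := by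
            simp [cleanRec, hb]
          have hpa : paraRec (l :: ls') cur = paraRec ls' (cur ++ [l]) := by
            simp [paraRec, hlne]
          rw [hcl, hpa, tbA_cons_nonblank l ls' hlne, ← IH.2 (cur ++ [l]) (by simp)]
          simp

theorem finTrue (ls : List (List Char))
    (H : ∀ l ∈ ls, (PySem.Chars.strip l = [] ↔ l = [])) :
    PySem.Chars.strip (PySem.Chars.join ['\n'] (cleanRec ls true)) =
      PySem.Chars.strip (PySem.Chars.join ['\n', '\n']
        ((paraRec ls []).map (PySem.Chars.join ['\n']))) := by
  have hG0 := (ggMain ls.length ls le_rfl H).1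
  rw [hG0]
  have hne : ∀ p ∈ paraRec ls [], p ≠ [] := fun p hp => paraRec_mem_ne ls [] p hp
  by_cases ha : ls.any (fun l => decide (l ≠ [])) = true
  · by_cases hlast : ls.getLast? = some ([] : List Char)
    · have h1 : tb0A ls = [[]] := by
        unfold tb0A
        rw [if_pos ha]
        unfold tbA
        rw [if_pos hlast]
      rw [h1, strip_join_append_blank, join_glue _ hne]
    · have h1 : tb0A ls = [] := by
        unfold tb0A
        rw [if_pos ha]
        unfold tbA
        rw [if_neg hlast]
      rw [h1, List.append_nil, join_glue _ hne]
  · have h1 : tb0A ls = [] := by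
      unfold tb0A
      rw [if_neg ha]
    rw [h1, List.append_nil, join_glue _ hne]

theorem finMain (ls : List (List Char))
    (H : ∀ l ∈ ls, (PySem.Chars.strip l = [] ↔ l = [])) :
    PySem.Chars.strip (PySem.Chars.join ['\n'] (cleanRec ls false)) =
      PySem.Chars.strip (PySem.Chars.join ['\n', '\n']
        ((paraRec ls []).map (PySem.Chars.join ['\n']))) := by
  cases ls with
  | nil => rfl
  | cons l ls' =>
    by_cases hb : PySem.Chars.strip l = []
    · have hl : l = [] := (H l (by simp)).mp hb
      subst hl
      have hcl : cleanRec ([] :: ls') false = [] :: cleanRec ls' true := by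
        simp [cleanRec, strip_nil_eq]
      have hpa : paraRec (([] : List Char) :: ls') [] = paraRec ls' [] := by
        simp [paraRec]
      rw [hcl, hpa, strip_join_blank_cons]
      exact finTrue ls' (fun x hx => H x (by simp [hx]))
    · have hcl : cleanRec (l :: ls') false = cleanRec (l :: ls') true := by
        simp [cleanRec, hb]
      rw [hcl]
      exact finTrue (l :: ls') H

-- ===== B-side lemmas: characterizing the two character passes =====

def consHead (pre : List Char) : List (List Char) → List (List Char)
  | [] => [pre]
  | p :: ps => (pre ++ p) :: ps

-- structural version of split-on-'\n'
def mySplit : List Char → List (List Char)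
  | [] => [[]]
  | c :: cs => if c = '\n' then [] :: mySplit cs else consHead [c] (mySplit cs)

theorem mySplit_ne_nil (s : List Char) : mySplit s ≠ [] := by
  cases s with
  | nil => simp [mySplit]
  | cons c cs =>
    by_cases h : c = '\n'
    · simp [mySplit, h]
    · simp only [mySplit, if_neg h]
      cases hm : mySplit cs <;> simp [consHead]

theorem consHead_nil (s : List Char) : consHead [] (mySplit s) = mySplit s := by
  cases hm : mySplit s with
  | nil => exact absurd hm (mySplit_ne_nil s)
  | cons p ps => simp [consHead]

theorem consHead_assoc (a b : List Char) (l : List (List Char)) :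
    consHead a (consHead b l) = consHead (a ++ b) l := by
  cases l <;> simp [consHead, List.append_assoc]

theorem go_eq : ∀ (fuel : ℕ) (l cur : List Char) (acc : List (List Char)), l.length ≤ fuel →
    PySem.Chars.splitOn.go ['\n'] fuel l cur acc =
      acc.reverse ++ consHead cur.reverse (mySplit l) := by
  intro fuel
  induction fuel with
  | zero =>
    intro l cur acc h
    have hl : l = [] := by simpa using h
    subst hl
    simp [PySem.Chars.splitOn.go, mySplit, consHead]
  | succ fuel ih =>
    intro l cur acc h
    cases l with
    | nil => simp [PySem.Chars.splitOn.go, mySplit, consHead]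
    | cons c rest =>
      by_cases hc : c = '\n'
      · subst hc
        have hpre : ['\n'].isPrefixOf ('\n' :: rest) = true := by simp [List.isPrefixOf]
        rw [PySem.Chars.splitOn.go]
        simp only [hpre, if_true]
        rw [show List.drop (['\n'] : List Char).length ('\n' :: rest) = rest from rfl]
        rw [ih rest [] (cur.reverse :: acc) (by simpa using h)]
        rw [show ([] : List Char).reverse = [] from rfl, consHead_nil]
        rw [show mySplit ('\n' :: rest) = [] :: mySplit rest by simp [mySplit]]
        simp [consHead]
      · have hpre : ['\n'].isPrefixOf (c :: rest) = false := by
          simp [List.isPrefixOf]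
          exact fun hh => absurd hh.symm hc
        rw [PySem.Chars.splitOn.go]
        simp only [hpre, Bool.false_eq_true, if_false]
        rw [ih rest (c :: cur) acc (by simpa using h)]
        rw [show (c :: cur).reverse = cur.reverse ++ [c] by simp]
        rw [show mySplit (c :: rest) = consHead [c] (mySplit rest) by simp [mySplit, hc]]
        rw [consHead_assoc]

theorem splitOn_nl (s : List Char) : PySem.Chars.splitOn s ['\n'] = mySplit s := by
  rw [PySem.Chars.splitOn, go_eq (s.length + 1) s [] [] (by omega)]
  simp [consHead_nil]

theorem mem_replace_go : ∀ (old new : List Char) (fuel : ℕ) (l acc : List Char) (c : Char),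
    c ∈ PySem.Chars.replace.go old new fuel l acc → c ∈ acc ∨ c ∈ l ∨ c ∈ new := by
  intro old new fuel
  induction fuel with
  | zero => intro l acc c h; rw [PySem.Chars.replace.go] at h; simp at h; tauto
  | succ fuel ih =>
    intro l acc c h
    cases l with
    | nil =>
      rw [PySem.Chars.replace.go] at h
      · left; simpa using h
      · omega
    | cons a t =>
      rw [PySem.Chars.replace.go] at h
      by_cases hp : old.isPrefixOf (a :: t) = true
      · simp only [hp, if_true] at h
        rcases ih _ _ _ h with h1 | h1 | h1
        · rcases List.mem_append.mp (by simpa using h1) with h2 | h2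
          · right; right; simpa using h2
          · left; exact h2
        · right; left; exact List.mem_of_mem_drop h1
        · tauto
      · simp only [hp] at h
        rcases ih _ _ _ h with h1 | h1 | h1
        · rcases List.mem_cons.mp h1 with h2 | h2
          · right; left; simp [h2]
          · left; exact h2
        · right; left; simp [h1]
        · tauto

theorem mem_replace (s : List Char) (o : Char) (os new : List Char) (c : Char)
    (h : c ∈ PySem.Chars.replace s (o :: os) new) : c ∈ s ∨ c ∈ new := by
  rw [PySem.Chars.replace] at h
  rw [List.isEmpty_cons] at h
  simp only [Bool.false_eq_true, if_false] at h
  have := mem_replace_go (o :: os) new s.length s [] c h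
  simpa using this

theorem no_cr_go : ∀ (fuel : ℕ) (l acc : List Char), l.length ≤ fuel → '\r' ∉ acc →
    '\r' ∉ PySem.Chars.replace.go ['\r'] ['\n'] fuel l acc := by
  intro fuel
  induction fuel with
  | zero =>
    intro l acc h hacc
    have : l = [] := by simpa using h
    subst this
    rw [PySem.Chars.replace.go]; simpa using hacc
  | succ fuel ih =>
    intro l acc h hacc
    cases l with
    | nil =>
      rw [PySem.Chars.replace.go]
      · simpa using hacc
      · omega
    | cons a t =>
      rw [PySem.Chars.replace.go]
      by_cases ha : a = '\r'
      · subst ha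
        have hp : (['\r'] : List Char).isPrefixOf ('\r' :: t) = true := by simp [List.isPrefixOf]
        simp only [hp, if_true]
        rw [show List.drop (['\r'] : List Char).length ('\r' :: t) = t from rfl]
        exact ih t _ (by simpa using h) (by simp [hacc])
      · have hp : (['\r'] : List Char).isPrefixOf (a :: t) = false := by
          simp [List.isPrefixOf]; exact fun hh => absurd hh.symm ha
        simp only [hp]
        refine ih t _ (by simpa using h) ?_
        intro hm
        rcases List.mem_cons.mp hm with h2 | h2
        · exact ha h2.symm
        · exact hacc h2

theorem no_cr_replace (s : List Char) : '\r' ∉ PySem.Chars.replace s ['\r'] ['\n'] := by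
  rw [PySem.Chars.replace]
  rw [List.isEmpty_cons]
  simp only [Bool.false_eq_true, if_false]
  exact no_cr_go s.length s [] le_rfl (by simp)

-- pass 1 (per-line rstrip as a character stream) as structural recursion
def p1Rec : List Char → List Char → List Char
  | [], _ => []
  | c :: cs, run =>
    if c = ' ' ∨ c = '\t' then p1Rec cs (run ++ [c])
    else if c = '\n' then '\n' :: p1Rec cs []
    else run ++ c :: p1Rec cs []

theorem fold1_eq : ∀ (s : List Char) (out run : List Char),
    (s.foldl (fun st ch =>
      if ch = ' ' ∨ ch = '\t' then (st.1, st.2 ++ [ch])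
      else if ch = '\n' then (st.1 ++ ['\n'], ([] : List Char))
      else (st.1 ++ st.2 ++ [ch], [])) (out, run)).1 = out ++ p1Rec s run := by
  intro s
  induction s with
  | nil => intro out run; simp [p1Rec]
  | cons c cs ih =>
    intro out run
    rw [List.foldl_cons]
    by_cases h1 : c = ' ' ∨ c = '\t'
    · have hstep : (if c = ' ' ∨ c = '\t' then ((out, run).1, (out, run).2 ++ [c])
          else if c = '\n' then ((out, run).1 ++ ['\n'], ([] : List Char))
          else ((out, run).1 ++ (out, run).2 ++ [c], [])) = ((out, run ++ [c]) : List Char × List Char) := by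
        simp [h1]
      rw [hstep, ih]
      simp [p1Rec, h1]
    · by_cases h2 : c = '\n'
      · have hstep : (if c = ' ' ∨ c = '\t' then ((out, run).1, (out, run).2 ++ [c])
            else if c = '\n' then ((out, run).1 ++ ['\n'], ([] : List Char))
            else ((out, run).1 ++ (out, run).2 ++ [c], [])) = ((out ++ ['\n'], []) : List Char × List Char) := by
          simp [h2]
        rw [hstep, ih]
        simp [p1Rec, h2]
      · have hstep : (if c = ' ' ∨ c = '\t' then ((out, run).1, (out, run).2 ++ [c])
            else if c = '\n' then ((out, run).1 ++ ['\n'], ([] : List Char))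
            else ((out, run).1 ++ (out, run).2 ++ [c], [])) = ((out ++ run ++ [c], []) : List Char × List Char) := by
          simp [h1, h2]
        rw [hstep, ih]
        simp [p1Rec, h1, h2]

theorem rstrip_all_space (run : List Char) (h : ∀ c ∈ run, c = ' ' ∨ c = '\t') :
    PySem.Chars.rstrip run = [] := by
  refine (rstrip_eq_nil_iff run).mpr ?_
  intro c hc
  rcases h c hc with h1 | h1 <;> subst h1 <;> decide

theorem dropWhile_append_nonspace (f : Char → Bool) (c : Char) (hc : f c = false) :
    ∀ (a b : List Char), List.dropWhile f (a ++ c :: b) = List.dropWhile f a ++ c :: b := by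
  intro a
  induction a with
  | nil => intro b; simp [List.dropWhile, hc]
  | cons x xs ih =>
    intro b
    by_cases hx : f x = true
    · simp [List.dropWhile, hx, ih]
    · simp [List.dropWhile, hx]

theorem rstrip_append_nonspace (c : Char) (hc : PySem.Chars.isspace c = false)
    (xs p : List Char) :
    PySem.Chars.rstrip (xs ++ c :: p) = xs ++ c :: PySem.Chars.rstrip p := by
  simp only [PySem.Chars.rstrip, List.reverse_append, List.reverse_cons]
  rw [show p.reverse ++ [c] ++ xs.reverse = p.reverse ++ c :: xs.reverse by simp]
  rw [dropWhile_append_nonspace _ c hc]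
  simp

-- pass 1 computes exactly '\n'.join(ln.rstrip() for ln in split(s, '\n'))
theorem p1_eq : ∀ (s : List Char), (∀ c ∈ s, pvDomChar c = true ∧ c ≠ '\r') →
    ∀ (run : List Char), (∀ c ∈ run, c = ' ' ∨ c = '\t') →
    p1Rec s run = PySem.Chars.join ['\n'] ((consHead run (mySplit s)).map PySem.Chars.rstrip) := by
  intro s
  induction s with
  | nil =>
    intro _ run hrun
    simp [p1Rec, mySplit, consHead, PySem.Chars.join_singleton, rstrip_all_space run hrun]
  | cons c cs ih =>
    intro hs run hrun
    have hcs : ∀ x ∈ cs, pvDomChar x = true ∧ x ≠ '\r' := fun x hx => hs x (by simp [hx])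
    by_cases h1 : c = ' ' ∨ c = '\t'
    · have hcnl : c ≠ '\n' := by rcases h1 with h | h <;> subst h <;> decide
      rw [show p1Rec (c :: cs) run = p1Rec cs (run ++ [c]) by simp [p1Rec, h1]]
      rw [show mySplit (c :: cs) = consHead [c] (mySplit cs) by simp [mySplit, hcnl]]
      rw [consHead_assoc]
      exact ih hcs (run ++ [c]) (by
        intro x hx
        rcases List.mem_append.mp hx with h2 | h2
        · exact hrun x h2
        · simp at h2; subst h2; exact h1)
    · by_cases h2 : c = '\n'
      · subst h2
        rw [show p1Rec ('\n' :: cs) run = '\n' :: p1Rec cs [] by simp [p1Rec]]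
        rw [show mySplit ('\n' :: cs) = [] :: mySplit cs by simp [mySplit]]
        rw [show consHead run ([] :: mySplit cs) = (run ++ []) :: mySplit cs from rfl]
        rw [List.append_nil]
        rw [List.map_cons]
        rw [rstrip_all_space run hrun]
        rcases hm : (mySplit cs).map PySem.Chars.rstrip with _ | ⟨m, ms⟩
        · exact absurd (List.map_eq_nil_iff.mp hm) (mySplit_ne_nil cs)
        · rw [PySem.Chars.join_cons_cons]
          rw [ih hcs [] (by simp), consHead_nil, hm]
          simp
      · have hsp : PySem.Chars.isspace c = false := by
          have hd := hs c (by simp)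
          have hne : c ≠ ' ' := fun h => h1 (Or.inl h)
          have hnt : c ≠ '\t' := fun h => h1 (Or.inr h)
          have n1 : c.toNat ≠ 32 := fun h => hne (by rw [← Char.ofNat_toNat c, h])
          have n2 : c.toNat ≠ 9 := fun h => hnt (by rw [← Char.ofNat_toNat c, h])
          have n3 : c.toNat ≠ 10 := fun h => h2 (by rw [← Char.ofNat_toNat c, h])
          have n4 : c.toNat ≠ 13 := fun h => hd.2 (by rw [← Char.ofNat_toNat c, h])
          have hdom := hd.1
          simp only [pvDomChar, Bool.or_eq_true, Bool.and_eq_true, decide_eq_true_eq,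
            beq_iff_eq] at hdom
          simp only [PySem.Chars.isspace, Bool.or_eq_false_iff, Bool.and_eq_false_iff,
            decide_eq_false_iff_not]
          omega
        rw [show p1Rec (c :: cs) run = run ++ c :: p1Rec cs [] by simp [p1Rec, h1, h2]]
        rw [show mySplit (c :: cs) = consHead [c] (mySplit cs) by simp [mySplit, h2]]
        rw [consHead_assoc]
        rcases hm : mySplit cs with _ | ⟨p, ps⟩
        · exact absurd hm (mySplit_ne_nil cs)
        · rw [show consHead (run ++ [c]) (p :: ps) = (run ++ [c] ++ p) :: ps from rfl]
          rw [List.map_cons]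
          rw [show run ++ [c] ++ p = run ++ c :: p by simp]
          rw [rstrip_append_nonspace c hsp run p]
          have ihcs := ih hcs [] (by simp)
          rw [consHead_nil, hm, List.map_cons] at ihcs
          rcases hps : ps.map PySem.Chars.rstrip with _ | ⟨m, ms⟩
          · rw [PySem.Chars.join_singleton]
            rw [hps, PySem.Chars.join_singleton] at ihcs
            rw [ihcs]
          · rw [PySem.Chars.join_cons_cons]
            rw [hps, PySem.Chars.join_cons_cons] at ihcs
            rw [ihcs]
            simp

-- pass 2 (collapse newline runs) as structural recursion
def pass2Rec : List Char → Nat → List Char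
  | [], _ => []
  | c :: cs, nl =>
    if c = '\n' then pass2Rec cs (nl + 1)
    else List.replicate (min nl 2) '\n' ++ c :: pass2Rec cs 0

-- pass 2 expressed on the list of lines
def lineRec : List (List Char) → Nat → List Char
  | [], _ => []
  | l :: ls, n =>
    if l = [] then lineRec ls (n + 1)
    else List.replicate (min n 2) '\n' ++ l ++ lineRec ls 1

theorem fold2_eq : ∀ (cs : List Char) (acc : List Char) (nl : Nat),
    (cs.foldl (fun st ch =>
      if ch = '\n' then (st.1, st.2 + 1)
      else (st.1 ++ List.replicate (min st.2 2) '\n' ++ [ch], 0)) (acc, nl)).1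
      = acc ++ pass2Rec cs nl := by
  intro cs
  induction cs with
  | nil => intro acc nl; simp [pass2Rec]
  | cons c cs ih =>
    intro acc nl
    rw [List.foldl_cons]
    by_cases h : c = '\n'
    · have hstep : (if c = '\n' then ((acc, nl).1, (acc, nl).2 + 1)
          else ((acc, nl).1 ++ List.replicate (min (acc, nl).2 2) '\n' ++ [c], 0)) = ((acc, nl + 1) : List Char × Nat) := by simp [h]
      rw [hstep, ih]
      simp [pass2Rec, h]
    · have hstep : (if c = '\n' then ((acc, nl).1, (acc, nl).2 + 1)
          else ((acc, nl).1 ++ List.replicate (min (acc, nl).2 2) '\n' ++ [c], 0)) = ((acc ++ List.replicate (min nl 2) '\n' ++ [c], 0) : List Char × Nat) := by simp [h]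
      rw [hstep, ih]
      simp [pass2Rec, h]

theorem pass2_append_nl : ∀ (xs : List Char) (n : ℕ),
    pass2Rec (xs ++ ['\n']) n = pass2Rec xs n := by
  intro xs
  induction xs with
  | nil => intro n; simp [pass2Rec]
  | cons c cs ih =>
    intro n
    by_cases h : c = '\n' <;> simp [pass2Rec, h, ih]

theorem pass2_line : ∀ (l : List Char), l ≠ [] → '\n' ∉ l → ∀ (cs : List Char) (n : ℕ),
    pass2Rec (l ++ cs) n = List.replicate (min n 2) '\n' ++ l ++ pass2Rec cs 0 := by
  intro l
  induction l with
  | nil => intro h; exact absurd rfl h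
  | cons c l ih =>
    intro _ hnl cs n
    have hc : c ≠ '\n' := fun h => hnl (by simp [h])
    cases l with
    | nil => simp [pass2Rec, hc]
    | cons d l' =>
      rw [show (c :: d :: l') ++ cs = c :: ((d :: l') ++ cs) by simp]
      rw [show pass2Rec (c :: ((d :: l') ++ cs)) n
          = List.replicate (min n 2) '\n' ++ c :: pass2Rec ((d :: l') ++ cs) 0 by
        simp [pass2Rec, hc]]
      rw [ih (by simp) (fun h => hnl (by simp [h])) cs 0]
      simp

theorem flatMap_join : ∀ (rl : List (List Char)), rl ≠ [] →
    PySem.Chars.join ['\n'] rl ++ ['\n'] = rl.flatMap (fun l => l ++ ['\n']) := by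
  intro rl
  induction rl with
  | nil => intro h; exact absurd rfl h
  | cons x xs ih =>
    intro _
    cases xs with
    | nil => simp [PySem.Chars.join_singleton]
    | cons y ys =>
      rw [PySem.Chars.join_cons_cons, List.flatMap_cons, ← ih (by simp)]
      simp

theorem pass2_flatMap : ∀ (rl : List (List Char)), (∀ l ∈ rl, '\n' ∉ l) → ∀ (n : ℕ),
    pass2Rec (rl.flatMap (fun l => l ++ ['\n'])) n = lineRec rl n := by
  intro rl
  induction rl with
  | nil => intro _ n; simp [pass2Rec, lineRec]
  | cons l ls ih =>
    intro h n
    have hls : ∀ x ∈ ls, '\n' ∉ x := fun x hx => h x (by simp [hx])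
    rw [List.flatMap_cons]
    by_cases hl : l = []
    · subst hl
      rw [show (([] : List Char) ++ ['\n']) ++ ls.flatMap (fun l => l ++ ['\n'])
          = '\n' :: ls.flatMap (fun l => l ++ ['\n']) by simp]
      rw [show pass2Rec ('\n' :: ls.flatMap (fun l => l ++ ['\n'])) n
          = pass2Rec (ls.flatMap (fun l => l ++ ['\n'])) (n + 1) by simp [pass2Rec]]
      rw [ih hls (n + 1)]
      simp [lineRec]
    · rw [show (l ++ ['\n']) ++ ls.flatMap (fun l => l ++ ['\n'])
          = l ++ ('\n' :: ls.flatMap (fun l => l ++ ['\n'])) by simp]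
      rw [pass2_line l hl (h l (by simp)) _ n]
      rw [show pass2Rec ('\n' :: ls.flatMap (fun l => l ++ ['\n'])) 0
          = pass2Rec (ls.flatMap (fun l => l ++ ['\n'])) 1 by simp [pass2Rec]]
      rw [ih hls 1]
      simp [lineRec, hl]

theorem strip_replicate_nl : ∀ (k : ℕ) (xs : List Char),
    PySem.Chars.strip (List.replicate k '\n' ++ xs) = PySem.Chars.strip xs := by
  intro k
  induction k with
  | zero => intro xs; simp
  | succ k ih =>
    intro xs
    rw [show List.replicate (k + 1) '\n' ++ xs = '\n' :: (List.replicate k '\n' ++ xs) by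
      simp [List.replicate_succ]]
    rw [strip_cons_nl, ih]

theorem lineRec_strip : ∀ (rl : List (List Char)) (n m : ℕ),
    PySem.Chars.strip (lineRec rl n) = PySem.Chars.strip (lineRec rl m) := by
  intro rl
  induction rl with
  | nil => intro n m; rfl
  | cons l ls ih =>
    intro n m
    by_cases hl : l = []
    · simp only [lineRec, if_pos hl]
      exact ih (n + 1) (m + 1)
    · simp only [lineRec, if_neg hl]
      rw [show List.replicate (min n 2) '\n' ++ l ++ lineRec ls 1
          = List.replicate (min n 2) '\n' ++ (l ++ lineRec ls 1) by simp]
      rw [show List.replicate (min m 2) '\n' ++ l ++ lineRec ls 1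
          = List.replicate (min m 2) '\n' ++ (l ++ lineRec ls 1) by simp]
      rw [strip_replicate_nl, strip_replicate_nl]

-- pass 2 on lines vs. the paragraph normal form
theorem lineRec_para : ∀ (rl : List (List Char)),
    (∀ (cur : List (List Char)), cur ≠ [] →
      PySem.Chars.join ['\n'] cur ++ lineRec rl 1 =
        PySem.Chars.join ['\n', '\n'] ((paraRec rl cur).map (PySem.Chars.join ['\n']))) ∧
    (∀ (n : ℕ), lineRec rl (n + 2) =
      if paraRec rl [] = [] then []
      else '\n' :: '\n' :: PySem.Chars.join ['\n', '\n'] ((paraRec rl []).map (PySem.Chars.join ['\n']))) := by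
  intro rl
  induction rl with
  | nil =>
    constructor
    · intro cur hc
      simp [lineRec, paraRec, hc, PySem.Chars.join_singleton]
    · intro n
      simp [lineRec, paraRec]
  | cons l ls ih =>
    constructor
    · intro cur hc
      by_cases hl : l = []
      · subst hl
        rw [show lineRec ([] :: ls) 1 = lineRec ls 2 from by simp [lineRec]]
        rw [show paraRec ([] :: ls) cur = cur :: paraRec ls [] by simp [paraRec, hc]]
        rw [show (2 : ℕ) = 0 + 2 from rfl, ih.2 0]
        by_cases hP : paraRec ls [] = []
        · rw [if_pos hP, hP]
          simp [PySem.Chars.join_singleton]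
        · rw [if_neg hP]
          rcases hm : (paraRec ls []).map (PySem.Chars.join ['\n']) with _ | ⟨m, ms⟩
          · exact absurd (List.map_eq_nil_iff.mp hm) hP
          · rw [List.map_cons, hm, PySem.Chars.join_cons_cons]
            simp
      · rw [show lineRec (l :: ls) 1 = List.replicate 1 '\n' ++ l ++ lineRec ls 1 by
          simp [lineRec, hl]]
        rw [show paraRec (l :: ls) cur = paraRec ls (cur ++ [l]) by simp [paraRec, hl]]
        rw [← ih.1 (cur ++ [l]) (by simp)]
        rw [join_append ['\n'] cur [l] hc (by simp)]
        simp [PySem.Chars.join_singleton]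
    · intro n
      by_cases hl : l = []
      · subst hl
        rw [show lineRec ([] :: ls) (n + 2) = lineRec ls (n + 3) from by simp [lineRec]]
        rw [show n + 3 = (n + 1) + 2 from rfl, ih.2 (n + 1)]
        rw [show paraRec (([] : List Char) :: ls) [] = paraRec ls [] by simp [paraRec]]
      · rw [show lineRec (l :: ls) (n + 2) = List.replicate 2 '\n' ++ l ++ lineRec ls 1 by
          simp [lineRec, hl]]
        rw [show paraRec (l :: ls) [] = paraRec ls [l] by simp [paraRec, hl]]
        rw [if_neg (paraRec_ne_nil_of_cur ls [l] (by simp))]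
        rw [← ih.1 [l] (by simp)]
        simp [PySem.Chars.join_singleton, List.replicate_succ]

theorem mem_rstrip (p : List Char) (c : Char) (h : c ∈ PySem.Chars.rstrip p) : c ∈ p := by
  simp only [PySem.Chars.rstrip, List.mem_reverse] at h
  have := (List.dropWhile_sublist (l := p.reverse) (p := PySem.Chars.isspace)).subset h
  simpa using this

theorem mem_mySplit : ∀ (s : List Char) (p : List Char), p ∈ mySplit s → '\n' ∉ p := by
  intro s
  induction s with
  | nil => intro p hp; simp [mySplit] at hp; simp [hp]
  | cons c cs ih =>
    intro p hp
    by_cases hc : c = '\n'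
    · rw [show mySplit (c :: cs) = [] :: mySplit cs by simp [mySplit, hc]] at hp
      rcases List.mem_cons.mp hp with h1 | h1
      · simp [h1]
      · exact ih p h1
    · rw [show mySplit (c :: cs) = consHead [c] (mySplit cs) by simp [mySplit, hc]] at hp
      rcases hm : mySplit cs with _ | ⟨q, qs⟩
      · exact absurd hm (mySplit_ne_nil cs)
      · rw [hm] at hp
        rcases List.mem_cons.mp hp with h1 | h1
        · subst h1
          intro hmem
          rcases List.mem_cons.mp hmem with h2 | h2
          · exact hc h2.symm
          · exact ih q (by simp [hm]) h2
        · exact ih p (by simp [hm, h1])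

-- B reduced to the paragraph normal form
theorem b_final (t : List Char) (hdom : ∀ c ∈ t, pvDomChar c = true ∧ c ≠ '\r') :
    PySem.Chars.strip (pass2Rec (p1Rec t []) 0) =
      PySem.Chars.strip (PySem.Chars.join ['\n', '\n']
        ((paraRec ((mySplit t).map PySem.Chars.rstrip) []).map (PySem.Chars.join ['\n']))) := by
  have hp1 : p1Rec t [] = PySem.Chars.join ['\n'] ((mySplit t).map PySem.Chars.rstrip) := by
    rw [p1_eq t hdom [] (by simp), consHead_nil]
  set rl : List (List Char) := (mySplit t).map PySem.Chars.rstrip with hrl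
  have hne : rl ≠ [] := by
    rw [hrl]
    simpa using mySplit_ne_nil t
  have hnn : ∀ l ∈ rl, '\n' ∉ l := by
    intro l hl
    rcases List.mem_map.mp hl with ⟨p, hp, hpe⟩
    intro hmem
    exact mem_mySplit t p hp (mem_rstrip p '\n' (hpe ▸ hmem))
  rw [hp1, ← pass2_append_nl, flatMap_join rl hne, pass2_flatMap rl hnn 0]
  rw [lineRec_strip rl 0 2]
  rw [show (2 : ℕ) = 0 + 2 from rfl, (lineRec_para rl).2 0]
  by_cases hP : paraRec rl [] = []
  · rw [if_pos hP, hP]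
    rfl
  · rw [if_neg hP, strip_cons_nl, strip_cons_nl]

-- ===== VERDICT (by name: the statement is the Claim_ definition above) =====
theorem normalize_extracted_text_py_spec : Claim_equal_normalize_extracted_text_py := by
  intro text hdom
  show normalize_extracted_text_py text = normalize_extracted_text_py_alt text
  simp only [normalize_extracted_text_py, normalize_extracted_text_py_alt]
  set t : List Char :=
    PySem.Chars.replace (PySem.Chars.replace (text.getD "").toList ['\r', '\n'] ['\n']) ['\r'] ['\n'] with ht
  have hdomt : ∀ c ∈ t, pvDomChar c = true ∧ c ≠ '\r' := by
    intro c hc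
    constructor
    · rcases mem_replace _ '\r' [] ['\n'] c hc with h1 | h1
      · rcases mem_replace _ '\r' ['\n'] ['\n'] c h1 with h2 | h2
        · cases text with
          | none => simp at h2
          | some s =>
            have : pvDomStr s = true := by
              simpa [Dom_normalize_extracted_text_py] using hdom
            exact List.all_eq_true.mp (by simpa [pvDomStr] using this) c (by simpa using h2)
        · simp at h2; subst h2; decide
      · simp at h1; subst h1; decide
    · intro h
      subst h
      exact no_cr_replace _ hc
  rw [foldA_eq _ [] false, List.nil_append]
  rw [fold1_eq _ [] [], List.nil_append, fold2_eq _ [] 0, List.nil_append]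
  rw [splitOn_nl]
  refine congrArg String.ofList ?_
  have H : ∀ l ∈ (mySplit t).map PySem.Chars.rstrip, (PySem.Chars.strip l = [] ↔ l = []) := by
    intro l hl
    rcases List.mem_map.mp hl with ⟨x, _, hx⟩
    rw [← hx]
    exact strip_rstrip_nil_iff x
  rw [finMain _ H, b_final t hdomt]
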